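-- pv_equiv track=rewrite | github.com/PirashanthR/Algorithms-for-speech-and-natural-language-processing | TP4/parser/system/Utils.py | level_of_each_symbol
-- ===== SOURCE A (Python) =====
-- def level_of_each_symbol(line):
--     '''
--     Fonction qui donne le "niveau" de chaque symbole grâce au décompte des parenthèses
--     Param: @line: ligne qui est un exemple de parsing sous le format SEQUOIA
--     '''
--     list_of_level = []
--     split_line = line.split()
--     cur_level = 0
--     for word in split_line[1:]: #doesn't consider the first parenthese
--         if '(' in word:
--             cur_level = cur_level +1
--             list_of_level.append(cur_level)
--         elif ')' in word:
--             nb_parenthese = len([v for v in word if v==')'])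
--             cur_level=  cur_level - nb_parenthese
--
--     return list_of_level
-- ===== SOURCE B (Python) =====
-- def level_of_each_symbol(line):
--     '''Structural recursion with relative depths: levels(words) returns the
--     levels of the opening words assuming the recursion is entered at depth 0;
--     the recursive result for the tail is shifted wholesale by the head word's
--     contribution.  No running counter is maintained.'''
--     def levels(words):
--         if not words:
--             return []
--         w, rest = words[0], words[1:]
--         if '(' in w:
--             return [1] + [d + 1 for d in levels(rest)]
--         if ')' in w:
--             k = w.count(')')
--             return [d - k for d in levels(rest)]
--         return levels(rest)
--     return levels(line.split()[1:])
-- ===== Notes on version B (the rewrite author's own statement) =====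
-- stated objective: alternative
-- what changed: Replaces A's iterative loop with a running depth counter by a counter-free structural recursion that computes levels relative to the current position and shifts the whole recursive result of the tail by the head word's delta.
import Mathlib
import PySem

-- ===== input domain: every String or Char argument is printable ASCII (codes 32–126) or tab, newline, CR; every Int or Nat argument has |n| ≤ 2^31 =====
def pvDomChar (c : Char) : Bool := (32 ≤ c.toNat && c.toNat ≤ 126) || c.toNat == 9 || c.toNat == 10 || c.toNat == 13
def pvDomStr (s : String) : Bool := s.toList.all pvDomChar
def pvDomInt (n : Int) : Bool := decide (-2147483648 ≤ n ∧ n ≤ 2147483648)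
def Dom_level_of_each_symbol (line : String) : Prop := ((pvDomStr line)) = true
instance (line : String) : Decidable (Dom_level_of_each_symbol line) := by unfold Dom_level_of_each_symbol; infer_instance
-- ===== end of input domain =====

-- B replaces A's counter-carrying loop by a counter-free structural recursion on the word list
-- that shifts the tail's recursive result wholesale (alternative decomposition).

-- ===== PORT A =====
-- the body of A's for-loop over split_line[1:], state = (list_of_level, cur_level)
def aStep (st : List Int × Int) (word : String) : List Int × Int :=
  if PySem.Str.isIn "(" word then (st.1 ++ [st.2 + 1], st.2 + 1)
  else if PySem.Str.isIn ")" word then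
    (st.1, st.2 - ((word.toList.filter (fun v => v == ')')).length : Int))
  else st

def level_of_each_symbol (line : String) : List Int :=
  ((PySem.List.slice (PySem.Str.split₀ line) (some 1) none).foldl aStep ([], 0)).1

-- ===== PORT B =====
-- Source B's inner 'levels': levels of the opening words relative to entry depth 0
def bLevels : List String → List Int
  | [] => []
  | w :: rest =>
    if PySem.Str.isIn "(" w then 1 :: (bLevels rest).map (fun d => d + 1)
    else if PySem.Str.isIn ")" w then
      (bLevels rest).map (fun d => d - (PySem.Str.count w ")" : Int))
    else bLevels rest

def level_of_each_symbol_alt (line : String) : List Int :=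
  bLevels (PySem.List.slice (PySem.Str.split₀ line) (some 1) none)

-- ===== PRECONDITION & SPEC =====
def Spec_level_of_each_symbol (line : String) (out : List Int) : Prop := out = level_of_each_symbol_alt line
instance (line : String) (out : List Int) : Decidable (Spec_level_of_each_symbol line out) := by unfold Spec_level_of_each_symbol; infer_instance

-- ===== CLAIM (what is proved, stated in full; the proofs are below) =====
def Claim_equal_level_of_each_symbol : Prop := ∀ (line : String), Dom_level_of_each_symbol line → Spec_level_of_each_symbol line (level_of_each_symbol line)

-- ===== LEMMAS AND PROOFS =====

-- single-character substring count is the character count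
lemma count_go_single (c : Char) : ∀ (fuel : Nat) (s : List Char) (acc : Nat),
    s.length ≤ fuel → PySem.Chars.count.go [c] fuel s acc = acc + s.count c := by
  intro fuel
  induction fuel with
  | zero =>
    intro s acc h
    cases s with
    | nil => simp [PySem.Chars.count.go]
    | cons x t => simp at h
  | succ n ih =>
    intro s acc h
    cases s with
    | nil => simp [PySem.Chars.count.go]
    | cons x t =>
      simp only [PySem.Chars.count.go]
      by_cases hx : x = c
      · subst hx
        simp [List.isPrefixOf, ih t _ (by simpa using Nat.le_of_succ_le_succ h)]
        omega
      · have : List.isPrefixOf [c] (x :: t) = false := by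
          simp [List.isPrefixOf, Ne.symm hx]
        simp [this, ih t _ (by simpa using Nat.le_of_succ_le_succ h), hx]

lemma filter_len_eq_count (w : String) :
    ((w.toList.filter (fun v => v == ')')).length : Int) = (PySem.Str.count w ")" : Int) := by
  have h : PySem.Str.count w ")" = w.toList.count ')' := by
    have := count_go_single ')' w.toList.length w.toList 0 le_rfl
    simp only [PySem.Str.count_eq]
    simpa [PySem.Chars.count, String.toList] using this
  rw [h, List.count]
  simp [List.countP_eq_length_filter]

-- loop invariant: A's fold from (acc, t) equals acc ++ B's relative levels shifted by t
lemma foldA_eq (ws : List String) : ∀ (acc : List Int) (t : Int),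
    (ws.foldl aStep (acc, t)).1 = acc ++ (bLevels ws).map (fun d => d + t) := by
  induction ws with
  | nil => intro acc t; simp [bLevels]
  | cons w rest ih =>
    intro acc t
    simp only [List.foldl_cons, bLevels]
    by_cases h1 : PySem.Str.isIn "(" w = true
    · simp only [aStep, h1, if_pos]
      rw [ih, List.append_assoc]
      simp only [List.map_cons, List.map_map, List.singleton_append]
      refine congrArg (acc ++ ·) ?_
      refine List.cons_eq_cons.mpr ⟨by ring, List.map_congr_left fun d _ => ?_⟩
      simp only [Function.comp_apply]
      ring
    · by_cases h2 : PySem.Str.isIn ")" w = true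
      · simp only [aStep, h1, h2, Bool.false_eq_true, if_false, if_pos]
        rw [ih]
        simp only [List.map_map]
        congr 1
        apply List.map_congr_left; intro d _
        simp [Function.comp, filter_len_eq_count w]; ring
      · simp only [aStep, h1, h2, Bool.false_eq_true, if_false]
        exact ih acc t

-- ===== VERDICT (by name: the statement is the Claim_ definition above) =====
theorem level_of_each_symbol_spec : Claim_equal_level_of_each_symbol := by
  intro line _
  unfold Spec_level_of_each_symbol level_of_each_symbol level_of_each_symbol_alt
  rw [foldA_eq]
  simp
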